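-- pv_equiv track=rewrite | github.com/tititasf/Estrutural_Analyser | _ROBOS_ABAS/pilares-legacy/src_obfuscated/utils/funcoes_auxiliares_3.py | aplicar_regras_de_soma
-- ===== SOURCE A (Python) =====
-- def aplicar_regras_de_soma(aberturas):
--     """Aplica regras específicas de soma para aberturas"""
--     if not aberturas:
--         return []
--
--     # Se há apenas uma abertura, retorna como está
--     if len(aberturas) == 1:
--         return aberturas
--
--     # Ordena as aberturas por posição
--     aberturas_ordenadas = sorted(aberturas, key=lambda x: x[0])
--
--     # Aplica regras de soma baseadas na proximidade
--     resultado = []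
--     i = 0
--     while i < len(aberturas_ordenadas):
--         abertura_atual = aberturas_ordenadas[i]
--         pos_atual, largura_atual, altura_atual = abertura_atual
--
--         # Verifica se a próxima abertura está próxima o suficiente para somar
--         if i + 1 < len(aberturas_ordenadas):
--             proxima_abertura = aberturas_ordenadas[i + 1]
--             pos_proxima, largura_proxima, altura_proxima = proxima_abertura
--
--             # Se estão próximas (menos de 10cm de distância), soma
--             if abs(pos_proxima - (pos_atual + largura_atual)) < 10:
--                 # Soma as larguras e mantém a maior altura
--                 nova_largura = largura_atual + largura_proxima + abs(pos_proxima - (pos_atual + largura_atual))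
--                 nova_altura = max(altura_atual, altura_proxima)
--                 resultado.append((pos_atual, nova_largura, nova_altura))
--                 i += 2  # Pula as duas aberturas
--             else:
--                 resultado.append(abertura_atual)
--                 i += 1
--         else:
--             resultado.append(abertura_atual)
--             i += 1
--
--     return resultado
-- ===== SOURCE B (Python) =====
-- def aplicar_regras_de_soma(aberturas):
--     """Aplica regras específicas de soma para aberturas"""
--     if not aberturas:
--         return []
--     if len(aberturas) == 1:
--         return aberturas
--     return _merge(sorted(aberturas, key=lambda x: x[0]))
--
--
-- def _merge(xs):
--     """Recursao estrutural: funde os dois primeiros se a folga < 10, senao mantem o primeiro."""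
--     if not xs:
--         return []
--     if len(xs) == 1:
--         return [xs[0]]
--     (p1, l1, a1), (p2, l2, a2) = xs[0], xs[1]
--     gap = abs(p2 - (p1 + l1))
--     if gap < 10:
--         return [(p1, l1 + l2 + gap, max(a1, a2))] + _merge(xs[2:])
--     return [xs[0]] + _merge(xs[1:])
-- ===== Notes on version B (the rewrite author's own statement) =====
-- stated objective: alternative
-- what changed: Replaced A's index-driven while loop (mutable i advanced by 1 or 2, repeated indexing, appending to a result list) by a pure structural recursion over the sorted list that pattern-matches the first one or two elements and prepends to the recursive result.
import Mathlib
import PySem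

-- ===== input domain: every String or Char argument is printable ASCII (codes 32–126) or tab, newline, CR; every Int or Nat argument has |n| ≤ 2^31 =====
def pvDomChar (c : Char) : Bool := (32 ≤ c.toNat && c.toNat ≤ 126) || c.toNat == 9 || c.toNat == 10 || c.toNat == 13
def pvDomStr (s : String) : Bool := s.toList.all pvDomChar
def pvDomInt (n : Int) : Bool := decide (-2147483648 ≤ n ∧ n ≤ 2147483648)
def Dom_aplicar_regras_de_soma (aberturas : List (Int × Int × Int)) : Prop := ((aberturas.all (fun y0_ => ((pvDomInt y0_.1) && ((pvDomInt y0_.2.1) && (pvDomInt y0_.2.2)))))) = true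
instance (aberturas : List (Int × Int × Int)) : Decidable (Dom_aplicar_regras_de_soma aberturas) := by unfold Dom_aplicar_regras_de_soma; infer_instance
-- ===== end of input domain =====

-- B replaces A's index-driven while loop (mutable i advanced by 1 or 2) by a pure
-- structural recursion over the sorted list (objective: alternative decomposition).

-- ===== PORT A =====
-- A's while loop over the sorted list, indexed by i (terminates as length - i shrinks).
def pvLoopA (xs : List (Int × Int × Int)) (i : Nat) (res : List (Int × Int × Int)) :
    List (Int × Int × Int) :=
  if h : i < xs.length then
    let cur := xs[i]
    if h2 : i + 1 < xs.length then
      let nxt := xs[i + 1]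
      if |nxt.1 - (cur.1 + cur.2.1)| < 10 then
        pvLoopA xs (i + 2)
          (res ++ [(cur.1, cur.2.1 + nxt.2.1 + |nxt.1 - (cur.1 + cur.2.1)|,
                    max cur.2.2 nxt.2.2)])
      else
        pvLoopA xs (i + 1) (res ++ [cur])
    else
      res ++ [cur]
  else
    res
termination_by xs.length - i

def aplicar_regras_de_soma (aberturas : List (Int × Int × Int)) : List (Int × Int × Int) :=
  if aberturas = [] then []
  else if aberturas.length = 1 then aberturas
  else pvLoopA (PySem.List.sorted aberturas (fun x => x.1) false) 0 []

-- ===== PORT B =====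
-- Source B's _merge: structural recursion on the sorted list
def pvMergeB : List (Int × Int × Int) → List (Int × Int × Int)
  | [] => []
  | [a] => [a]
  | a :: b :: rest =>
    let gap := |b.1 - (a.1 + a.2.1)|
    if gap < 10 then
      (a.1, a.2.1 + b.2.1 + gap, max a.2.2 b.2.2) :: pvMergeB rest
    else
      a :: pvMergeB (b :: rest)

def aplicar_regras_de_soma_alt (aberturas : List (Int × Int × Int)) : List (Int × Int × Int) :=
  if aberturas = [] then []
  else if aberturas.length = 1 then aberturas
  else pvMergeB (PySem.List.sorted aberturas (fun x => x.1) false)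

-- ===== PRECONDITION & SPEC =====
def Spec_aplicar_regras_de_soma (aberturas : List (Int × Int × Int)) (out : List (Int × Int × Int)) : Prop := out = aplicar_regras_de_soma_alt aberturas
instance (aberturas : List (Int × Int × Int)) (out : List (Int × Int × Int)) : Decidable (Spec_aplicar_regras_de_soma aberturas out) := by unfold Spec_aplicar_regras_de_soma; infer_instance

-- ===== CLAIM =====
def Claim_equal_aplicar_regras_de_soma : Prop := ∀ (aberturas : List (Int × Int × Int)), Dom_aplicar_regras_de_soma aberturas → Spec_aplicar_regras_de_soma aberturas (aplicar_regras_de_soma aberturas)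

-- ===== LEMMAS AND PROOFS =====
theorem pvLoopA_eq_mergeB (xs : List (Int × Int × Int)) (i : Nat)
    (res : List (Int × Int × Int)) :
    pvLoopA xs i res = res ++ pvMergeB (xs.drop i) := by
  by_cases h : i < xs.length
  · have hdrop : xs.drop i = xs[i] :: xs.drop (i + 1) := (List.getElem_cons_drop h).symm
    by_cases h2 : i + 1 < xs.length
    · have hdrop2 : xs.drop (i + 1) = xs[i + 1] :: xs.drop (i + 2) :=
        (List.getElem_cons_drop h2).symm
      by_cases h3 : |(xs[i + 1]).1 - ((xs[i]).1 + (xs[i]).2.1)| < 10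
      · rw [pvLoopA]
        simp only [h, h2, h3, dif_pos, if_pos]
        rw [pvLoopA_eq_mergeB xs (i + 2), hdrop, hdrop2, pvMergeB]
        simp [h3]
      · rw [pvLoopA]
        simp only [h, h2, dif_pos, if_neg h3]
        rw [pvLoopA_eq_mergeB xs (i + 1), hdrop, hdrop2, pvMergeB]
        simp [h3]
    · have hlast : xs.drop (i + 1) = [] := List.drop_eq_nil_of_le (by omega)
      rw [pvLoopA]
      simp [h, h2, hdrop, hlast, pvMergeB]
  · have : xs.drop i = [] := List.drop_eq_nil_of_le (by omega)
    rw [pvLoopA, this]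
    simp [h, pvMergeB]
termination_by xs.length - i

-- ===== VERDICT =====
theorem aplicar_regras_de_soma_spec : Claim_equal_aplicar_regras_de_soma := by
  intro ab _
  unfold Spec_aplicar_regras_de_soma aplicar_regras_de_soma aplicar_regras_de_soma_alt
  by_cases h0 : ab = []
  · simp [h0]
  · by_cases h1 : ab.length = 1
    · simp [h0, h1]
    · simp only [h0, h1, if_false]
      rw [pvLoopA_eq_mergeB, List.drop_zero, List.nil_append]
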